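-- pv_equiv track=rewrite | github.com/BenchBadr/map-maker | deps/solver.py | sac_a_dos
-- ===== SOURCE A (Python) =====
-- def sac_a_dos(ens, somme):
--     if (somme == 0):
--         return []
--     if (somme < 0):
--         return None
--     if len(ens) == 0:
--         return None
--     res = sac_a_dos(ens[1:], somme - ens[0])
--     if res is not None:
--         res.append(ens[0])
--         return res
--     else:
--         return sac_a_dos(ens[1:], somme)
-- ===== SOURCE B (Python) =====
-- def sac_a_dos(ens, somme):
--     n = len(ens)
--     memo = {}
--     def feas(i, s):
--         if s == 0: return True
--         if s < 0 or i == n: return False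
--         key = (i, s)
--         v = memo.get(key)
--         if v is None:
--             v = feas(i + 1, s - ens[i]) or feas(i + 1, s)
--             memo[key] = v
--         return v
--     if not feas(0, somme): return None
--     chosen = []
--     s = somme
--     i = 0
--     while s != 0:
--         if feas(i + 1, s - ens[i]):
--             chosen.append(ens[i]); s -= ens[i]
--         i += 1
--     return chosen[::-1]
-- ===== Notes on version B (the rewrite author's own statement) =====
-- stated objective: alternative
-- what changed: Replaced A's naive include/exclude double recursion (which rebuilds the answer list at every node) by a dict-memoized boolean feasibility search over (index, remaining-sum) states plus a single greedy include-first reconstruction pass, preserving A's tie-break and output order; the memo avoids revisiting repeated states, though on random large-value instances hard cases remain exponential for both.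
import Mathlib
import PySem

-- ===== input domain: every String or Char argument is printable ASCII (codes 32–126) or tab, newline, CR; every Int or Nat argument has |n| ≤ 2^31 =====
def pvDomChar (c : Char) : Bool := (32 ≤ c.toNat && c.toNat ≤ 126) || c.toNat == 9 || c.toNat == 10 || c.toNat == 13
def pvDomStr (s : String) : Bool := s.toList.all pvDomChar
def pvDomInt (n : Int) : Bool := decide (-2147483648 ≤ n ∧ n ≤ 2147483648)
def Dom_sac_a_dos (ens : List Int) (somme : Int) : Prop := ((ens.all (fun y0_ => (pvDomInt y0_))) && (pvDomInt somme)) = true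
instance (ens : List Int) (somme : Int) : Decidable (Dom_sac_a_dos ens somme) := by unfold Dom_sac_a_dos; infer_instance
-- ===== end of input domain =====

-- B replaces A's naive include/exclude double recursion by a dict-memoized boolean
-- feasibility search plus a separate greedy include-first reconstruction pass (alternative).

-- ===== PORT A =====
def sac_a_dos (ens : List Int) (somme : Int) : Option (List Int) :=
  if somme = 0 then some []
  else if somme < 0 then none
  else match ens with
    | [] => none
    | e :: t =>
      match sac_a_dos t (somme - e) with
      | some res => some (res ++ [e])
      | none => sac_a_dos t somme
termination_by ens.length

-- ===== PORT B =====
-- feas(i, s) of Source B; the suffix ens[i:] is passed alongside the index i (Python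
-- reads it as ens[i] from the closed-over list), the memo dict is threaded through.
def pvFeas : List Int → Int → Int → PySem.Dict (Int × Int) Bool → Bool × PySem.Dict (Int × Int) Bool
  | t, i, s, memo =>
    if s = 0 then (true, memo)
    else if s < 0 then (false, memo)
    else match t with
      | [] => (false, memo)                       -- the 'i == n' test
      | e :: t' =>
        match memo.get? (i, s) with
        | some v => (v, memo)
        | none =>
          let r1 := pvFeas t' (i + 1) (s - e) memo
          if r1.1 then (true, r1.2.insert (i, s) true)
          else
            let r2 := pvFeas t' (i + 1) s r1.2   -- short-circuit 'or': only when the first call was False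
            (r2.1, r2.2.insert (i, s) r2.1)

-- the 'while s != 0' reconstruction loop of Source B, over the suffix ens[i:];
-- the [] case is unreachable when feas(i, s) holds (Python never reads past the end)
def pvRecon : List Int → Int → Int → PySem.Dict (Int × Int) Bool → List Int → List Int
  | t, i, s, memo, chosen =>
    if s = 0 then chosen
    else match t with
      | [] => chosen
      | e :: t' =>
        let r1 := pvFeas t' (i + 1) (s - e) memo
        if r1.1 then pvRecon t' (i + 1) (s - e) r1.2 (chosen ++ [e])
        else pvRecon t' (i + 1) s r1.2 chosen

def sac_a_dos_alt (ens : List Int) (somme : Int) : Option (List Int) :=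
  let r := pvFeas ens 0 somme PySem.Dict.empty
  if r.1 then some (pvRecon ens 0 somme r.2 []).reverse
  else none

-- ===== PRECONDITION & SPEC =====
def Spec_sac_a_dos (ens : List Int) (somme : Int) (out : Option (List Int)) : Prop := out = sac_a_dos_alt ens somme
instance (ens : List Int) (somme : Int) (out : Option (List Int)) : Decidable (Spec_sac_a_dos ens somme out) := by unfold Spec_sac_a_dos; infer_instance

-- ===== CLAIM (what is proved, stated in full; the proofs are below) =====
def Claim_equal_sac_a_dos : Prop := ∀ (ens : List Int) (somme : Int), Dom_sac_a_dos ens somme → Spec_sac_a_dos ens somme (sac_a_dos ens somme)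

-- ===== LEMMAS AND PROOFS =====

theorem sac_cons (e : Int) (t : List Int) (s : Int) :
    sac_a_dos (e :: t) s =
      if s = 0 then some []
      else if s < 0 then none
      else match sac_a_dos t (s - e) with
        | some res => some (res ++ [e])
        | none => sac_a_dos t s := by
  conv_lhs => rw [sac_a_dos]

theorem sac_nil (s : Int) :
    sac_a_dos [] s = if s = 0 then some [] else none := by
  conv_lhs => rw [sac_a_dos]
  split_ifs <;> rfl

-- every memo entry (i, s) ↦ v records whether A succeeds on the suffix ens[i:] with target s
def MemoOK (ens : List Int) (m : PySem.Dict (Int × Int) Bool) : Prop :=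
  ∀ i s v, m.get? (i, s) = some v → v = (sac_a_dos (ens.drop i.toNat) s).isSome

theorem pv_drop_tail (ens t' : List Int) (e : Int) (i : Int) (h0 : 0 ≤ i)
    (h : ens.drop i.toNat = e :: t') : ens.drop (i + 1).toNat = t' := by
  have h1 : (i + 1).toNat = i.toNat + 1 := by omega
  rw [h1, ← List.drop_drop, h]
  rfl

theorem pvFeas_correct (ens : List Int) :
    ∀ (t : List Int) (i s : Int) (m : PySem.Dict (Int × Int) Bool),
      0 ≤ i → ens.drop i.toNat = t → MemoOK ens m →
      (pvFeas t i s m).1 = (sac_a_dos t s).isSome ∧ MemoOK ens (pvFeas t i s m).2 := by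
  intro t
  induction t with
  | nil =>
    intro i s m h0 ht hm
    rw [pvFeas, sac_nil]
    split_ifs <;> simpa
  | cons e t' ih =>
    intro i s m h0 ht hm
    rw [pvFeas, sac_cons]
    split_ifs with hs0 hneg
    · simpa
    · simpa
    · have ht' : ens.drop (i + 1).toNat = t' := pv_drop_tail ens t' e i h0 ht
      cases hg : m.get? (i, s) with
      | some v =>
        refine ⟨?_, by simpa using hm⟩
        have := hm i s v hg
        rw [ht] at this
        rw [this]
        rw [sac_cons]
        simp [hs0, hneg]
      | none =>
        dsimp only
        obtain ⟨ha, hm1⟩ := ih (i + 1) (s - e) m (by omega) ht' hm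
        by_cases hA : (pvFeas t' (i + 1) (s - e) m).1
        · rw [if_pos hA]
          rw [hA] at ha
          cases hAv : sac_a_dos t' (s - e) with
          | none => rw [hAv] at ha; simp at ha
          | some r0 =>
            constructor
            · simp
            · intro j u v hg'
              dsimp only at hg'
              rcases eq_or_ne ((j, u) : Int × Int) (i, s) with he | he
              · obtain ⟨rfl, rfl⟩ : j = i ∧ u = s := by cases he; exact ⟨rfl, rfl⟩
                rw [PySem.Dict.get?_insert_self] at hg'
                simp only [Option.some.injEq] at hg'
                rw [← hg', ht, sac_cons]
                simp [hs0, hneg, hAv]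
              · rw [PySem.Dict.get?_insert_of_ne _ _ he] at hg'
                exact hm1 j u v hg'
        · rw [if_neg hA]
          simp only [Bool.not_eq_true] at hA
          rw [hA] at ha
          cases hAv : sac_a_dos t' (s - e) with
          | some r0 => rw [hAv] at ha; simp at ha
          | none =>
            obtain ⟨hb, hm2⟩ := ih (i + 1) s (pvFeas t' (i + 1) (s - e) m).2 (by omega) ht' hm1
            constructor
            · dsimp only; rw [hb]
            · intro j u v hg'
              dsimp only at hg'
              rcases eq_or_ne ((j, u) : Int × Int) (i, s) with he | he
              · obtain ⟨rfl, rfl⟩ : j = i ∧ u = s := by cases he; exact ⟨rfl, rfl⟩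
                rw [PySem.Dict.get?_insert_self] at hg'
                simp only [Option.some.injEq] at hg'
                rw [← hg', ht, sac_cons]
                simp [hs0, hneg, hAv]
                rw [hb]
              · rw [PySem.Dict.get?_insert_of_ne _ _ he] at hg'
                exact hm2 j u v hg'

theorem pvRecon_correct (ens : List Int) :
    ∀ (t : List Int) (i s : Int) (m : PySem.Dict (Int × Int) Bool) (res chosen : List Int),
      0 ≤ i → ens.drop i.toNat = t → MemoOK ens m →
      sac_a_dos t s = some res →
      pvRecon t i s m chosen = chosen ++ res.reverse := by
  intro t
  induction t with
  | nil =>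
    intro i s m res chosen h0 ht hm h
    rw [sac_nil] at h
    split_ifs at h with hs0
    simp only [Option.some.injEq] at h
    rw [pvRecon, if_pos hs0, ← h]
    simp
  | cons e t' ih =>
    intro i s m res chosen h0 ht hm h
    rw [sac_cons] at h
    rw [pvRecon]
    dsimp only
    split_ifs at h with hs0 hneg
    · simp only [Option.some.injEq] at h
      rw [if_pos hs0, ← h]
      simp
    · rw [if_neg hs0]
      have ht' : ens.drop (i + 1).toNat = t' := pv_drop_tail ens t' e i h0 ht
      obtain ⟨ha, hm1⟩ := pvFeas_correct ens t' (i + 1) (s - e) m (by omega) ht' hm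
      cases hAv : sac_a_dos t' (s - e) with
      | some r0 =>
        rw [hAv] at h
        simp only [Option.some.injEq] at h
        have hatrue : (pvFeas t' (i + 1) (s - e) m).1 = true := by rw [ha, hAv]; rfl
        rw [hatrue, if_pos rfl]
        rw [ih (i + 1) (s - e) _ r0 (chosen ++ [e]) (by omega) ht' hm1 hAv]
        simp [← h]
      | none =>
        rw [hAv] at h
        have hafalse : (pvFeas t' (i + 1) (s - e) m).1 = false := by rw [ha, hAv]; rfl
        rw [hafalse]
        simp only [Bool.false_eq_true, if_false]
        exact ih (i + 1) s _ res chosen (by omega) ht' hm1 h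

-- ===== VERDICT (by name: the statement is the Claim_ definition above) =====
theorem sac_a_dos_spec : Claim_equal_sac_a_dos := by
  intro ens somme _
  unfold Spec_sac_a_dos sac_a_dos_alt
  have hempty : MemoOK ens PySem.Dict.empty := by
    intro i s v hg
    simp [PySem.Dict.get?_empty] at hg
  obtain ⟨hok, hm⟩ := pvFeas_correct ens ens 0 somme PySem.Dict.empty le_rfl (by simp) hempty
  cases hA : sac_a_dos ens somme with
  | none =>
    have : (pvFeas ens 0 somme PySem.Dict.empty).1 = false := by rw [hok, hA]; rfl
    simp [this]
  | some res =>
    have hok' : (pvFeas ens 0 somme PySem.Dict.empty).1 = true := by rw [hok, hA]; rfl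
    simp only [hok', if_pos]
    rw [pvRecon_correct ens ens 0 somme _ res [] le_rfl (by simp) hm hA]
    simp
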